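-- pv_equiv track=rewrite | github.com/tsg-humlab/SL-head-movement-detection | dataset/preparation/inter_annotator_agreement.py | count_elements_within_difference
-- ===== SOURCE A (Python) =====
-- def count_elements_within_difference(arr1, arr2, threshold):
--     """
--     Count the number of elements within difference range
--     """
--     count = 0
--     for x in arr1:
--         for y in arr2:
--             if abs(x - y) <= threshold:
--                 count += 1
--                 break  # Break to avoid counting the same element in arr1 multiple times
--     return count
-- ===== SOURCE B (Python) =====
-- def count_elements_within_difference(arr1, arr2, threshold):
--     """
--     Count the number of elements within difference range
--     (sort arr2 once, then binary-search a neighbor for each element of arr1)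
--     """
--     a2 = sorted(arr2)
--     n = len(a2)
--     count = 0
--     for x in arr1:
--         target = x - threshold
--         lo, hi = 0, n
--         while lo < hi:
--             mid = (lo + hi) // 2
--             if a2[mid] < target:
--                 lo = mid + 1
--             else:
--                 hi = mid
--         if lo < n and a2[lo] <= x + threshold:
--             count += 1
--     return count
-- ===== Notes on version B (the rewrite author's own statement) =====
-- stated objective: faster
-- what changed: Replaces the linear scan of arr2 for every arr1 element by sorting arr2 once and binary-searching the first element >= x - threshold.
import Mathlib
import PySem

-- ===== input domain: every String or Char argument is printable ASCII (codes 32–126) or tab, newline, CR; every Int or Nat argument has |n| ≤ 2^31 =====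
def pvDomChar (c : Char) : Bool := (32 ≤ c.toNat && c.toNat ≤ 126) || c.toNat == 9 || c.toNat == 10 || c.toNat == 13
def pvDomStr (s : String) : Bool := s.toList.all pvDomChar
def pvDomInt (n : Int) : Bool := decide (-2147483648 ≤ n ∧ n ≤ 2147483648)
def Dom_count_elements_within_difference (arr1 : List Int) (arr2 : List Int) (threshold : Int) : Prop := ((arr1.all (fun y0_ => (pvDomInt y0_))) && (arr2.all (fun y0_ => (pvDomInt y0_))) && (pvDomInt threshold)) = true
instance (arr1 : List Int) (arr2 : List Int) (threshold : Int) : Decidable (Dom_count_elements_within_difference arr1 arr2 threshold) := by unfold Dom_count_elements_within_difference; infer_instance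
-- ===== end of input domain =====

-- B sorts arr2 once and binary-searches a near neighbor for each arr1 element instead of A's inner linear scan.


-- ===== PORT A =====
-- inner 'for y in arr2: if abs(x - y) <= threshold: count += 1; break' — the increment the inner loop adds
def pvInnerScan (x : Int) (threshold : Int) : List Int → Int
  | [] => 0
  | y :: ys => if |x - y| ≤ threshold then 1 else pvInnerScan x threshold ys

def count_elements_within_difference (arr1 : List Int) (arr2 : List Int) (threshold : Int) : Int :=
  arr1.foldl (fun count x => count + pvInnerScan x threshold arr2) 0

-- ===== PORT B =====
-- hand-written binary search of Source B: first index in [lo, hi) whose element is >= target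
def pvBis (a2 : List Int) (target : Int) (lo hi : Nat) : Nat :=
  if lo < hi then
    let mid := (lo + hi) / 2
    if a2.getD mid 0 < target then pvBis a2 target (mid + 1) hi
    else pvBis a2 target lo mid
  else lo
termination_by hi - lo
decreasing_by all_goals omega

def count_elements_within_difference_alt (arr1 : List Int) (arr2 : List Int) (threshold : Int) : Int :=
  let a2 := PySem.List.sorted arr2 (fun y => y) false
  let n := a2.length
  arr1.foldl (fun count x =>
    let lo := pvBis a2 (x - threshold) 0 n
    if lo < n ∧ a2.getD lo 0 ≤ x + threshold then count + 1 else count) 0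

-- ===== PRECONDITION & SPEC =====
def Spec_count_elements_within_difference (arr1 : List Int) (arr2 : List Int) (threshold : Int) (out : Int) : Prop := out = count_elements_within_difference_alt arr1 arr2 threshold
instance (arr1 : List Int) (arr2 : List Int) (threshold : Int) (out : Int) : Decidable (Spec_count_elements_within_difference arr1 arr2 threshold out) := by unfold Spec_count_elements_within_difference; infer_instance

-- ===== CLAIM (what is proved, stated in full; the proofs are below) =====
def Claim_equal_count_elements_within_difference : Prop := ∀ (arr1 : List Int) (arr2 : List Int) (threshold : Int), Dom_count_elements_within_difference arr1 arr2 threshold → Spec_count_elements_within_difference arr1 arr2 threshold (count_elements_within_difference arr1 arr2 threshold)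

-- ===== LEMMAS AND PROOFS =====

-- a ≤-sorted list is pointwise monotone under getD
theorem pvGetD_mono (a2 : List Int) (hs : a2.Pairwise (· ≤ ·)) (i j : Nat)
    (hij : i ≤ j) (hj : j < a2.length) : a2.getD i 0 ≤ a2.getD j 0 := by
  rcases eq_or_lt_of_le hij with rfl | hlt
  · exact le_refl _
  · rw [List.getD_eq_getElem a2 0 (lt_of_le_of_lt hij hj), List.getD_eq_getElem a2 0 hj]
    exact (List.pairwise_iff_getElem.mp hs) i j _ _ hlt

-- the binary search returns the first index ≥ lo at which the element reaches target,
-- given the invariants that everything below lo is < target and everything from hi on is ≥ target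
theorem pvBis_spec (a2 : List Int) (hs : a2.Pairwise (· ≤ ·)) (target : Int) :
    ∀ fuel lo hi, hi - lo ≤ fuel → lo ≤ hi → hi ≤ a2.length →
    (∀ i, i < lo → a2.getD i 0 < target) →
    (∀ i, hi ≤ i → i < a2.length → target ≤ a2.getD i 0) →
    pvBis a2 target lo hi ≤ a2.length ∧
    (∀ i, i < pvBis a2 target lo hi → a2.getD i 0 < target) ∧
    (∀ i, pvBis a2 target lo hi ≤ i → i < a2.length → target ≤ a2.getD i 0) := by
  intro fuel
  induction fuel with
  | zero =>
    intro lo hi hf hlh hhl hlow hhigh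
    have : lo = hi := by omega
    subst this
    rw [pvBis]; simp only [lt_irrefl, if_false]
    exact ⟨by omega, hlow, hhigh⟩
  | succ f ih =>
    intro lo hi hf hlh hhl hlow hhigh
    rw [pvBis]
    by_cases h : lo < hi
    · simp only [h, if_true]
      set mid := (lo + hi) / 2 with hmid
      have hm1 : lo ≤ mid := by omega
      have hm2 : mid < hi := by omega
      by_cases hc : a2.getD mid 0 < target
      · simp only [hc, if_true]
        refine ih (mid + 1) hi (by omega) (by omega) hhl ?_ hhigh
        intro i hi'
        by_cases hil : i < lo
        · exact hlow i hil
        · exact lt_of_le_of_lt (pvGetD_mono a2 hs i mid (by omega) (by omega)) hc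
      · simp only [hc, if_false]
        refine ih lo mid (by omega) (by omega) (by omega) hlow ?_
        intro i hmi hil
        exact le_trans (not_lt.mp hc) (pvGetD_mono a2 hs mid i hmi hil)
    · simp only [h, if_false]
      have : lo = hi := by omega
      subst this
      exact ⟨by omega, hlow, hhigh⟩

-- A's inner loop computes 1 iff some element of arr2 is within threshold of x
theorem pvInnerScan_eq_any (x t : Int) (l : List Int) :
    pvInnerScan x t l = if ∃ y ∈ l, |x - y| ≤ t then 1 else 0 := by
  induction l with
  | nil => simp [pvInnerScan]
  | cons y ys ih =>
    rw [pvInnerScan]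
    by_cases h : |x - y| ≤ t
    · simp [h]
    · rw [if_neg h, ih]
      have he : (∃ z ∈ y :: ys, |x - z| ≤ t) ↔ ∃ z ∈ ys, |x - z| ≤ t := by
        constructor
        · rintro ⟨z, hz, hzt⟩
          rcases List.mem_cons.mp hz with rfl | hz'
          · exact absurd hzt h
          · exact ⟨z, hz', hzt⟩
        · rintro ⟨z, hz, hzt⟩
          exact ⟨z, List.mem_cons_of_mem _ hz, hzt⟩
      rw [if_congr he rfl rfl]

-- B's per-element test agrees with A's inner scan, for any sorted rearrangement a2 of arr2
theorem pvStep_eq (a2 arr2 : List Int) (hs : a2.Pairwise (· ≤ ·))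
    (hmem : ∀ y, y ∈ a2 ↔ y ∈ arr2) (t x : Int) :
    (if pvBis a2 (x - t) 0 a2.length < a2.length ∧
        a2.getD (pvBis a2 (x - t) 0 a2.length) 0 ≤ x + t then (1 : Int) else 0)
      = pvInnerScan x t arr2 := by
  rw [pvInnerScan_eq_any]
  obtain ⟨hle, hbelow, habove⟩ :=
    pvBis_spec a2 hs (x - t) a2.length 0 a2.length (by omega) (by omega) (le_refl _)
      (by omega) (fun i hi1 hi2 => by omega)
  by_cases hcond : pvBis a2 (x - t) 0 a2.length < a2.length ∧
      a2.getD (pvBis a2 (x - t) 0 a2.length) 0 ≤ x + t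
  · rw [if_pos hcond, if_pos]
    refine ⟨a2.getD (pvBis a2 (x - t) 0 a2.length) 0, ?_, ?_⟩
    · rw [← hmem, List.getD_eq_getElem a2 0 hcond.1]
      exact List.getElem_mem _
    · have := habove _ (le_refl _) hcond.1
      rw [abs_le]
      omega
  · rw [if_neg hcond, if_neg]
    rintro ⟨y, hy, hyt⟩
    rw [← hmem] at hy
    obtain ⟨j, hj, hjy⟩ := List.mem_iff_getElem.mp hy
    have hgj : a2.getD j 0 = y := by rw [List.getD_eq_getElem a2 0 hj, hjy]
    have habs := abs_le.mp hyt
    have hjlo : pvBis a2 (x - t) 0 a2.length ≤ j := by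
      by_contra hc
      have := hbelow j (by omega)
      omega
    refine hcond ⟨by omega, ?_⟩
    have := pvGetD_mono a2 hs _ j hjlo hj
    omega

theorem pvFoldl_eq (arr2 : List Int) (t : Int) (a2 : List Int)
    (hs : a2.Pairwise (· ≤ ·)) (hmem : ∀ y, y ∈ a2 ↔ y ∈ arr2) :
    ∀ (xs : List Int) (c : Int),
    xs.foldl (fun count x => count + pvInnerScan x t arr2) c =
    xs.foldl (fun count x =>
      if pvBis a2 (x - t) 0 a2.length < a2.length ∧
         a2.getD (pvBis a2 (x - t) 0 a2.length) 0 ≤ x + t then count + 1 else count) c := by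
  intro xs
  induction xs with
  | nil => intro c; rfl
  | cons x xs ih =>
    intro c
    simp only [List.foldl_cons]
    rw [ih]
    congr 1
    rw [← pvStep_eq a2 arr2 hs hmem t x]
    split <;> omega

theorem count_elements_within_difference_eq (arr1 arr2 : List Int) (t : Int) :
    count_elements_within_difference arr1 arr2 t = count_elements_within_difference_alt arr1 arr2 t := by
  unfold count_elements_within_difference count_elements_within_difference_alt
  exact pvFoldl_eq arr2 t (PySem.List.sorted arr2 (fun y => y) false)
    (PySem.List.sorted_pairwise arr2 (fun y => y))
    (fun y => PySem.List.mem_sorted arr2 (fun z => z) false y) arr1 0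

-- ===== VERDICT (by name: the statement is the Claim_ definition above) =====
theorem count_elements_within_difference_spec : Claim_equal_count_elements_within_difference := by
  intro arr1 arr2 t _
  exact count_elements_within_difference_eq arr1 arr2 t
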